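-- pv_equiv track=rewrite | github.com/AHBruns/Ar-Bot-Rage | Algorithms/pather.py | group_markets
-- ===== SOURCE A (Python) =====
-- def group_markets(markets, base_currencies):
--     sorted_markets = []
--     for base_currency in base_currencies:
--         temp = []
--         for market in markets:
--             if base_currency[1] == market[2]:
--                 temp.append(market)
--         sorted_markets.append(temp)
--     return sorted_markets
-- ===== SOURCE B (Python) =====
-- def group_markets(markets, base_currencies):
--     result = [[] for _ in base_currencies]
--     if not markets or not base_currencies:
--         return result
--     positions = {}
--     for i, bc in enumerate(base_currencies):
--         positions[bc[1]] = positions.get(bc[1], []) + [i]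
--     for market in markets:
--         for i in positions.get(market[2], []):
--             result[i].append(market)
--     return result
-- ===== Notes on version B (the rewrite author's own statement) =====
-- stated objective: alternative
-- what changed: Instead of scanning all markets once per base currency (nested loops), B builds a hash index from currency to the list of base-currency positions and then scatters each market into its slots in a single pass over markets; it avoids the |base_currencies|*|markets| pair scan at the cost of building the index.
import Mathlib
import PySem

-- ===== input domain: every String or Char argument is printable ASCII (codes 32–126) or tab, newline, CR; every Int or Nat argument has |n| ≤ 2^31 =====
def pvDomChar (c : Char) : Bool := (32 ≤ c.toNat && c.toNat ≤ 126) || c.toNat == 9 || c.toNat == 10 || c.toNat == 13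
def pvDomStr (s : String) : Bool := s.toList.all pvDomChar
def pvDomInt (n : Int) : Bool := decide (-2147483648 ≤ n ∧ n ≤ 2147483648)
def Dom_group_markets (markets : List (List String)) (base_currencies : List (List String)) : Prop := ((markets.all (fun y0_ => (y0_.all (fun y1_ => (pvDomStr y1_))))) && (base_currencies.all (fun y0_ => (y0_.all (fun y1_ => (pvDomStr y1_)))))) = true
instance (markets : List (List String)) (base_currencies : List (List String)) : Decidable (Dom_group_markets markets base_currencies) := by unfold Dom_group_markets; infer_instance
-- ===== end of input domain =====

-- B builds a currency→positions hash index once and scatters each market into its slots in a single pass,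
-- instead of A's rescan of all markets once per base currency (objective: alternative algorithm).

-- ===== PORT A =====
def group_markets (markets : List (List String)) (base_currencies : List (List String)) : List (List (List String)) :=
  base_currencies.foldl
    (fun sorted_markets base_currency =>
      sorted_markets ++
        [markets.foldl
          (fun temp market =>
            if PySem.List.pyGet? base_currency 1 == PySem.List.pyGet? market 2 then temp ++ [market] else temp)
          []])
    []

-- ===== PORT B =====
-- result[i].append(market): i comes from enumerate, so 0 ≤ i and i.toNat is exact here.
def group_markets_alt (markets : List (List String)) (base_currencies : List (List String)) : List (List (List String)) :=
  let result := base_currencies.map (fun _ => ([] : List (List String)))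
  if markets = [] ∨ base_currencies = [] then result
  else
    let positions : PySem.Dict (Option String) (List Int) :=
      (PySem.List.enumerate base_currencies 0).foldl
        (fun d p => d.modify (PySem.List.pyGet? p.2 1) [] (fun l => l ++ [p.1])) PySem.Dict.empty
    markets.foldl
      (fun res market =>
        (positions.getD (PySem.List.pyGet? market 2) []).foldl
          (fun r i => r.modify i.toNat (fun l => l ++ [market])) res)
      result

-- ===== PRECONDITION & SPEC =====
-- Pre_ excludes exactly the inputs on which A raises IndexError: with both lists nonempty, A reads
-- base_currency[1] and market[2] for every pair, so any row shorter than that raises.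
def Pre_group_markets (markets : List (List String)) (base_currencies : List (List String)) : Prop :=
  markets = [] ∨ base_currencies = [] ∨
    ((∀ bc ∈ base_currencies, 2 ≤ bc.length) ∧ (∀ m ∈ markets, 3 ≤ m.length))
instance (markets : List (List String)) (base_currencies : List (List String)) : Decidable (Pre_group_markets markets base_currencies) := by unfold Pre_group_markets; infer_instance

def pvWitness_group_markets : List (List String) × List (List String) :=
  ([["m1", "x", "USD"], ["m2", "y", "EUR"], ["m3", "z", "USD"]], [["a", "USD"], ["b", "BTC"], ["c", "USD"]])

def Spec_group_markets (markets : List (List String)) (base_currencies : List (List String)) (out : List (List (List String))) : Prop := out = group_markets_alt markets base_currencies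
instance (markets : List (List String)) (base_currencies : List (List String)) (out : List (List (List String))) : Decidable (Spec_group_markets markets base_currencies out) := by unfold Spec_group_markets; infer_instance

-- ===== CLAIM (what is proved, stated in full; the proofs are below) =====
def Claim_equal_group_markets : Prop := ∀ (markets : List (List String)) (base_currencies : List (List String)), Dom_group_markets markets base_currencies → Pre_group_markets markets base_currencies → Spec_group_markets markets base_currencies (group_markets markets base_currencies)

-- ===== LEMMAS AND PROOFS =====

-- A in closed form: one filtered copy of markets per base currency.
theorem groupA_eq_map (markets base_currencies : List (List String)) :
    group_markets markets base_currencies =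
      base_currencies.map (fun bc =>
        markets.filter (fun m => PySem.List.pyGet? bc 1 == PySem.List.pyGet? m 2)) := by
  unfold group_markets
  rw [PySem.List.foldl_append_singleton_eq_map
    (fun bc => markets.foldl
      (fun temp market => if PySem.List.pyGet? bc 1 == PySem.List.pyGet? market 2 then temp ++ [market] else temp) [])]
  simp only [List.nil_append]
  refine List.map_congr_left (fun bc _ => ?_)
  simpa using PySem.List.foldl_append_if (fun m => PySem.List.pyGet? bc 1 == PySem.List.pyGet? m 2) (fun m => m) markets []

-- the index in closed form: positions.getD c [] lists the positions whose base currency's [1] is c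
theorem positions_getD (base_currencies : List (List String)) (c : Option String) :
    ((PySem.List.enumerate base_currencies 0).foldl
        (fun d p => d.modify (PySem.List.pyGet? p.2 1) [] (fun l => l ++ [p.1])) PySem.Dict.empty).getD c [] =
      (((PySem.List.enumerate base_currencies 0).map
          (fun p => (PySem.List.pyGet? p.2 1, p.1))).filter (fun q => q.1 == c)).map (fun q => q.2) := by
  rw [show ((PySem.List.enumerate base_currencies 0).foldl
        (fun d p => d.modify (PySem.List.pyGet? p.2 1) [] (fun l => l ++ [p.1])) PySem.Dict.empty)
      = (((PySem.List.enumerate base_currencies 0).map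
          (fun p => (PySem.List.pyGet? p.2 1, p.1))).foldl
        (fun d q => d.modify q.1 [] (fun l => l ++ [q.2])) PySem.Dict.empty) from by rw [List.foldl_map]]
  rw [PySem.Dict.getD_foldl_modify_append]
  simp

theorem mem_positions_getD (base_currencies : List (List String)) (c : Option String) (j : Nat)
    (hj : j < base_currencies.length) :
    ((j : Int) ∈ ((((PySem.List.enumerate base_currencies 0).map
          (fun p => (PySem.List.pyGet? p.2 1, p.1))).filter (fun q => q.1 == c)).map (fun q => q.2)))
      ↔ (PySem.List.pyGet? base_currencies[j] 1 == c) = true := by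
  simp only [List.mem_map, List.mem_filter, PySem.List.mem_enumerate_iff]
  constructor
  · rintro ⟨q, ⟨⟨p, ⟨k, hk, rfl⟩, rfl⟩, hc⟩, h2⟩
    simp at h2 hc ⊢
    have : k = j := by omega
    subst this; exact hc
  · intro h
    exact ⟨(PySem.List.pyGet? base_currencies[j] 1, (j:Int)), ⟨⟨((j:Int), base_currencies[j]), ⟨j, hj, by simp⟩, rfl⟩, h⟩, rfl⟩

-- the position lists are duplicate-free and nonnegative (they are filtered sublists of range(len))
theorem positions_getD_nodup_nonneg (base_currencies : List (List String)) (c : Option String) :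
    (((((PySem.List.enumerate base_currencies 0).map
          (fun p => (PySem.List.pyGet? p.2 1, p.1))).filter (fun q => q.1 == c)).map (fun q => q.2))).Nodup ∧
    ∀ i ∈ ((((PySem.List.enumerate base_currencies 0).map
          (fun p => (PySem.List.pyGet? p.2 1, p.1))).filter (fun q => q.1 == c)).map (fun q => q.2)), 0 ≤ i := by
  rw [List.filter_map, List.map_map]
  have hsub : ((PySem.List.enumerate base_currencies 0).filter
      ((fun q => q.1 == c) ∘ fun p => (PySem.List.pyGet? p.2 1, p.1))).map
        ((fun q : Option String × Int => q.2) ∘ fun p : Int × List String => (PySem.List.pyGet? p.2 1, p.1))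
      |>.Sublist ((PySem.List.enumerate base_currencies 0).map (fun p => p.1)) := by
    exact List.Sublist.map _ List.filter_sublist
  rw [PySem.List.map_fst_enumerate] at hsub
  constructor
  · exact hsub.nodup (by simpa using PySem.List.nodup_pyRange_one 0 (0 + base_currencies.length))
  · intro i hi
    have := hsub.mem hi
    rw [PySem.List.mem_pyRange_one] at this
    exact this.1

-- inner scatter loop, pointwise: appending one market to every slot in idxs
theorem scatter_one (idxs : List Int) (m : List String) (r : List (List (List String))) (j : Nat)
    (hnd : idxs.Nodup) (hnn : ∀ i ∈ idxs, 0 ≤ i) :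
    (idxs.foldl (fun r i => r.modify i.toNat (fun l => l ++ [m])) r)[j]? =
      if (j : Int) ∈ idxs then r[j]?.map (fun l => l ++ [m]) else r[j]? := by
  induction idxs generalizing r with
  | nil => simp
  | cons i rest ih =>
    simp only [List.foldl_cons]
    rw [ih _ (List.nodup_cons.mp hnd).2 (fun x hx => hnn x (List.mem_cons_of_mem _ hx))]
    have hi0 : 0 ≤ i := hnn i (List.mem_cons_self ..)
    by_cases hji : (j : Int) = i
    · have hjn : i.toNat = j := by omega
      have hnr : (j : Int) ∉ rest := by
        intro hr; exact (List.nodup_cons.mp hnd).1 (hji ▸ hr)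
      have hm : (j : Int) ∈ i :: rest := by simp [hji]
      simp only [if_neg hnr, if_pos hm, List.getElem?_modify, if_pos hjn]
      cases r[j]? <;> simp
    · have hjn : i.toNat ≠ j := by omega
      simp only [List.getElem?_modify, if_neg hjn]
      by_cases hr : (j : Int) ∈ rest
      · simp [hr, hji]
      · simp [hr, hji]

-- outer scatter loop, pointwise: slot j collects exactly the markets whose position list contains j
theorem scatter_all (ms : List (List String)) (positions : PySem.Dict (Option String) (List Int))
    (hnd : ∀ c, (positions.getD c []).Nodup) (hnn : ∀ c, ∀ i ∈ positions.getD c [], 0 ≤ i)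
    (res : List (List (List String))) (j : Nat) :
    (ms.foldl (fun res market => (positions.getD (PySem.List.pyGet? market 2) []).foldl
        (fun r i => r.modify i.toNat (fun l => l ++ [market])) res) res)[j]? =
      res[j]?.map (fun l => l ++ ms.filter (fun m => decide ((j : Int) ∈ positions.getD (PySem.List.pyGet? m 2) []))) := by
  induction ms generalizing res with
  | nil => cases h : res[j]? <;> simp [h]
  | cons m rest ih =>
    simp only [List.foldl_cons]
    rw [ih]
    rw [scatter_one _ m res j (hnd _) (hnn _)]
    by_cases hm : (j : Int) ∈ positions.getD (PySem.List.pyGet? m 2) []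
    · simp only [if_pos hm, List.filter_cons, decide_eq_true hm]
      cases res[j]? <;> simp
    · simp only [if_neg hm, List.filter_cons]
      have : decide ((j : Int) ∈ positions.getD (PySem.List.pyGet? m 2) []) = false := by simpa using hm
      rw [this]
      cases res[j]? <;> simp

-- ===== VERDICT (by name: the statement is the Claim_ definition above) =====
theorem group_markets_spec : Claim_equal_group_markets := by
  intro markets base_currencies _ _
  unfold Spec_group_markets group_markets_alt
  by_cases hguard : markets = [] ∨ base_currencies = []
  · rw [if_pos hguard, groupA_eq_map]
    rcases hguard with h | h
    · subst h; simp
    · subst h; simp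
  · rw [if_neg hguard]
    refine List.ext_getElem?_iff.mpr (fun j => ?_)
    rw [scatter_all _ _
      (fun c => by rw [positions_getD]; exact (positions_getD_nodup_nonneg base_currencies c).1)
      (fun c => by rw [positions_getD]; exact (positions_getD_nodup_nonneg base_currencies c).2)]
    rw [groupA_eq_map]
    by_cases hj : j < base_currencies.length
    · rw [List.getElem?_map, List.getElem?_map, List.getElem?_eq_getElem hj]
      simp only [Option.map_some, Option.some.injEq, List.nil_append]
      refine List.filter_congr (fun m _ => ?_)
      rw [positions_getD]
      rw [show decide ((j:Int) ∈ (((PySem.List.enumerate base_currencies 0).map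
          (fun p => (PySem.List.pyGet? p.2 1, p.1))).filter
            (fun q => q.1 == PySem.List.pyGet? m 2)).map (fun q => q.2))
        = (PySem.List.pyGet? base_currencies[j] 1 == PySem.List.pyGet? m 2) from by
          rw [Bool.eq_iff_iff, decide_eq_true_iff]
          exact mem_positions_getD base_currencies _ j hj]
    · have hge : base_currencies.length ≤ j := Nat.le_of_not_lt hj
      rw [List.getElem?_eq_none (by simpa using hge), List.getElem?_eq_none (by simpa using hge)]
      simp
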